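-- pv_equiv track=rewrite | github.com/MJszeineddine/URBAN_POINTS_LEBANON_CTO_FORENSIC_HANDOVER | tools/reality_scan/run_pivot_qatar.py | parse_gap_map
-- ===== SOURCE A (Python) =====
-- from typing import Dict, List
--
-- def parse_gap_map(md: str) -> Dict[str, Dict[str, str]]:
--     # Parse simple tables in sections: Subscription Offers, Consumer Discovery, Merchant Portal, Admin Portal
--     domains = {
--         "subscription": {},
--         "consumer": {},
--         "merchant": {},
--         "admin": {},
--     }
--     current = None
--     for line in md.splitlines():
--         if line.startswith("## "):
--             title = line[3:].strip().lower()
--             if title.startswith("subscription offers"):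
--                 current = "subscription"
--             elif title.startswith("consumer discovery"):
--                 current = "consumer"
--             elif title.startswith("merchant portal"):
--                 current = "merchant"
--             elif title.startswith("admin portal"):
--                 current = "admin"
--             else:
--                 current = None
--             continue
--         if current and line.startswith("|") and not line.startswith("|---"):
--             parts = [p.strip() for p in line.strip("|").split("|")]
--             if len(parts) >= 2:
--                 feature = parts[0]
--                 status = parts[1]
--                 domains[current][feature] = status
--     return domains
-- ===== SOURCE B (Python) =====
-- def _domain_for(title):
--     keymap = [
--         ("subscription offers", "subscription"),
--         ("consumer discovery", "consumer"),
--         ("merchant portal", "merchant"),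
--         ("admin portal", "admin"),
--     ]
--     return next((k for p, k in keymap if title.startswith(p)), None)
--
--
-- def parse_gap_map(md):
--     # Phase 1: split the document into sections (lowercased title, body lines).
--     sections = []
--     for line in md.splitlines():
--         if line.startswith("## "):
--             sections.append((line[3:].strip().lower(), []))
--         elif sections:
--             sections[-1][1].append(line)
--     # Phase 2: parse each recognised section's table rows into its domain dict.
--     domains = {"subscription": {}, "consumer": {}, "merchant": {}, "admin": {}}
--     for title, body in sections:
--         dom = _domain_for(title)
--         if dom is None:
--             continue
--         d = domains[dom]
--         for line in body:
--             if line.startswith("|") and not line.startswith("|---"):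
--                 cells = [c.strip() for c in line.strip("|").split("|")]
--                 if len(cells) >= 2:
--                     d[cells[0]] = cells[1]
--     return domains
-- ===== Notes on version B (the rewrite author's own statement) =====
-- stated objective: alternative
-- what changed: B replaces A's single stateful line loop (tracking 'current' across lines) with a two-phase decomposition: first group the lines into (title, body) sections, then map each title to its domain via a keymap table and parse each recognised section's rows.
import Mathlib
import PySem

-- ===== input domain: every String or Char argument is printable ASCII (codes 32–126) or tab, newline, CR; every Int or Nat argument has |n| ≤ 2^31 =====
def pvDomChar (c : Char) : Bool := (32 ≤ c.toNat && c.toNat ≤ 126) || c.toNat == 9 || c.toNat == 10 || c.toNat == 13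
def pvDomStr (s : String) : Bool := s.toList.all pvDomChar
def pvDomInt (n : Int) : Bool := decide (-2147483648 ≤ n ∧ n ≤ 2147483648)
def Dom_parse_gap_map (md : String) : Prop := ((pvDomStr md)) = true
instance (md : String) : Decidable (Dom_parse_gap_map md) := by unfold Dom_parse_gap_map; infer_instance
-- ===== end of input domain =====

-- B re-implements A as a two-phase decomposition (group lines into sections, then parse each
-- recognised section's rows); same return value, no speed claim.

-- ===== PORT A =====
abbrev GDict := PySem.Dict String (PySem.Dict String String)

def initDomains : GDict :=
  PySem.Dict.ofList
    [("subscription", PySem.Dict.empty), ("consumer", PySem.Dict.empty),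
     ("merchant", PySem.Dict.empty), ("admin", PySem.Dict.empty)]

-- the identical row-parsing code both Pythons contain:
-- 'if line.startswith("|") and not line.startswith("|---"): parts = [p.strip() for p in line.strip("|").split("|")];
--  if len(parts) >= 2: domains[dom][parts[0]] = parts[1]'
-- (dom is always one of the four keys present in domains, so Dict.modify with default empty is exact here;
--  split? with the nonempty separator "|" always returns some, so getD [] is exact)
def applyRow (dom : String) (d : GDict) (line : String) : GDict :=
  if PySem.Str.startswith line "|" && !PySem.Str.startswith line "|---" then
    match ((PySem.Str.split? (PySem.Str.stripChars line "|") "|").getD []).map PySem.Str.strip with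
    | feature :: status :: _ => d.modify dom PySem.Dict.empty (fun dd => dd.insert feature status)
    | _ => d
  else d

-- A's if/elif chain mapping a header title to a domain key
def matchTitle (title : String) : Option String :=
  if PySem.Str.startswith title "subscription offers" then some "subscription"
  else if PySem.Str.startswith title "consumer discovery" then some "consumer"
  else if PySem.Str.startswith title "merchant portal" then some "merchant"
  else if PySem.Str.startswith title "admin portal" then some "admin"
  else none

-- A's loop body; current = None ↔ none ('if current and …' — the four possible values are nonempty strings)
def stepA (st : GDict × Option String) (line : String) : GDict × Option String :=
  if PySem.Str.startswith line "## " then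
    (st.1, matchTitle (PySem.Str.lower (PySem.Str.strip (PySem.Str.slice line (some 3) none))))
  else
    match st.2 with
    | some cur => (applyRow cur st.1 line, st.2)
    | none => st

def parse_gap_map (md : String) : List (String × List (String × String)) :=
  (((PySem.Str.splitlines md).foldl stepA (initDomains, none)).1).items.map
    (fun p => (p.1, p.2.items))

-- ===== PORT B =====
-- phase 1: 'sections.append((title, []))' / 'sections[-1][1].append(line)' with the reversed accumulator
def step1 (acc : List (String × List String)) (line : String) : List (String × List String) :=
  if PySem.Str.startswith line "## " then
    (PySem.Str.lower (PySem.Str.strip (PySem.Str.slice line (some 3) none)), []) :: acc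
  else
    match acc with
    | [] => []
    | (t, ls) :: r => (t, line :: ls) :: r

-- Source B's _domain_for: first match in the keymap
def domainFor (title : String) : Option String :=
  [("subscription offers", "subscription"), ("consumer discovery", "consumer"),
   ("merchant portal", "merchant"), ("admin portal", "admin")].findSome?
    (fun pk => if PySem.Str.startswith title pk.1 then some pk.2 else none)

-- phase 2: parse one section's rows into its domain's dict (skip unrecognised titles)
def step2 (d : GDict) (sec : String × List String) : GDict :=
  match domainFor sec.1 with
  | none => d
  | some dom => sec.2.foldl (applyRow dom) d

def parse_gap_map_alt (md : String) : List (String × List (String × String)) :=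
  let secs := (((PySem.Str.splitlines md).foldl step1 []).map (fun p => (p.1, p.2.reverse))).reverse
  (secs.foldl step2 initDomains).items.map (fun p => (p.1, p.2.items))

-- ===== PRECONDITION & SPEC =====
def Spec_parse_gap_map (md : String) (out : List (String × List (String × String))) : Prop :=
  out = parse_gap_map_alt md
instance (md : String) (out : List (String × List (String × String))) : Decidable (Spec_parse_gap_map md out) := by
  unfold Spec_parse_gap_map; infer_instance

-- ===== CLAIM (what is proved, stated in full; the proofs are below) =====
def Claim_equal_parse_gap_map : Prop := ∀ (md : String), Dom_parse_gap_map md → Spec_parse_gap_map md (parse_gap_map md)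

-- ===== LEMMAS AND PROOFS =====

-- proof-only helpers: B's phase-1 finisher, and the 'current' value A holds when B's open section is acc's head
def finishAcc (acc : List (String × List String)) : List (String × List String) :=
  (acc.map (fun p => (p.1, p.2.reverse))).reverse

def curOf (acc : List (String × List String)) : Option String :=
  match acc with
  | [] => none
  | (t, _) :: _ => matchTitle t

theorem domainFor_eq_matchTitle (t : String) : domainFor t = matchTitle t := by
  simp only [domainFor, matchTitle, List.findSome?_cons, List.findSome?_nil]
  split_ifs <;> rfl

theorem finishAcc_cons (t : String) (ls : List String) (r : List (String × List String)) :
    finishAcc ((t, ls) :: r) = finishAcc r ++ [(t, ls.reverse)] := by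
  simp [finishAcc]

-- one step of A's loop = one step of B's phase-1 accumulator, seen through phase 2
theorem step_commute (acc : List (String × List String)) (line : String) :
    (List.foldl step2 initDomains (finishAcc (step1 acc line)), curOf (step1 acc line))
      = stepA (List.foldl step2 initDomains (finishAcc acc), curOf acc) line := by
  by_cases h : PySem.Chars.startswith line.toList ['#', '#', ' '] = true
  · cases hm : matchTitle (PySem.Str.lower (PySem.Str.strip (PySem.Str.slice line (some 3) none))) <;>
      simp [step1, stepA, h, curOf, finishAcc_cons, step2, domainFor_eq_matchTitle, hm]
  · match acc with
    | [] =>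
        simp [step1, stepA, h, curOf]
    | (t, ls) :: r =>
        cases hm : matchTitle t <;>
          simp [step1, stepA, h, curOf, finishAcc_cons, step2, domainFor_eq_matchTitle, hm,
            List.foldl_append]

-- the main invariant: B's phase 2 over the finished accumulator tracks A's fold
theorem key (lines : List String) : ∀ (acc : List (String × List String)),
    List.foldl step2 initDomains (finishAcc (List.foldl step1 acc lines))
      = (List.foldl stepA (List.foldl step2 initDomains (finishAcc acc), curOf acc) lines).1 := by
  induction lines with
  | nil => intro acc; rfl
  | cons line lines ih =>
      intro acc
      simp only [List.foldl_cons]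
      rw [ih (step1 acc line), ← step_commute]

-- ===== VERDICT (by name: the statement is the Claim_ definition above) =====
theorem parse_gap_map_spec : Claim_equal_parse_gap_map := by
  intro md _
  show parse_gap_map md = parse_gap_map_alt md
  unfold parse_gap_map parse_gap_map_alt
  have h := key (PySem.Str.splitlines md) []
  simp only [finishAcc, List.map_nil, List.reverse_nil, List.foldl_nil, curOf] at h
  rw [← h]
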